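-- pv_equiv track=rewrite | github.com/alliehayashi/codility-python | 4-1_FrogRiverOne.py | solution
-- ===== SOURCE A (Python) =====
-- def solution(X, A):
--     if X-0>=1 and len(A)>0:
--         A_list=set() #set會去除重複值
--         if X == len(A) and len(A) == 1:
--             return 0
--
--         for i in range(len(A)):
--             A_list.add(A[i]) #新數字加入set
--             if len(A_list) == X:
--                 return i
--         return -1 #無法過則return -1
-- ===== SOURCE B (Python) =====
-- def solution(X, A):
--     # one pass: record the index of the FIRST occurrence of each value;
--     # the X-th distinct value's first index is the answer (dict preserves
--     # insertion order, and first-occurrence indices are increasing)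
--     if X < 1 or len(A) == 0:
--         return None
--     first = {}
--     for i, v in enumerate(A):
--         if v not in first:
--             first[v] = i
--     vals = list(first.values())
--     if len(vals) < X:
--         return -1
--     return vals[X - 1]
-- ===== Notes on version B (the rewrite author's own statement) =====
-- stated objective: alternative
-- what changed: Replaces the running-set-with-early-exit scan by a build-then-select strategy: one full pass builds a first-occurrence dict, and the answer is read off as the X-th first-occurrence index (or -1 if fewer than X distinct values).
-- outside the precondition, e.g. on solution(0, [1]): A returns None, B returns None; on solution(1, []): A returns None, B returns None
import Mathlib
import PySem

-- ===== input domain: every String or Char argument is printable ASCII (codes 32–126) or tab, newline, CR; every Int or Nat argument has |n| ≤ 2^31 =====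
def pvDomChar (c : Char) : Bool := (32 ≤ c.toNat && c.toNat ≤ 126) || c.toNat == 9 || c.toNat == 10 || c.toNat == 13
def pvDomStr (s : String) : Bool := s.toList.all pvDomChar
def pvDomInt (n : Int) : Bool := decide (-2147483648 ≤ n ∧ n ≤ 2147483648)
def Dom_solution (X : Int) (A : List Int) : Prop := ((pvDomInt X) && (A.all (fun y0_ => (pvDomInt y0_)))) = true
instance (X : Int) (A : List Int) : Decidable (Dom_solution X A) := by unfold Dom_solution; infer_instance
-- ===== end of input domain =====

-- B replaces A's running-set scan with early exit by a build-then-select pass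
-- (first-occurrence dict, then the X-th first-occurrence index): alternative algorithm, same cost.


-- ===== PORT A =====
-- for i in range(len(A)): A_list.add(A[i]); if len(A_list) == X: return i   /   return -1
def solutionLoopA (X : Int) (A : List Int) : List Int → PySem.Set Int → Int
  | [], _ => -1
  | i :: rest, s =>
    let s' := PySem.Set.add s (PySem.List.pyGetD A i 0)   -- index i ∈ range(len(A)) is always in range
    if PySem.Set.len s' = X then i else solutionLoopA X A rest s'

def solution (X : Int) (A : List Int) : Int :=
  if X - 0 ≥ 1 ∧ (A.length : Int) > 0 then
    -- A_list = set()
    if X = (A.length : Int) ∧ (A.length : Int) = 1 then 0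
    else solutionLoopA X A (PySem.List.pyRange 0 (A.length : Int) 1) PySem.Set.empty
  else -1   -- Python A falls off the end and returns None here; excluded by Pre_solution

-- ===== PORT B =====
def solution_alt (X : Int) (A : List Int) : Int :=
  if X < 1 ∨ A = [] then -1   -- Python B returns None here; excluded by Pre_solution
  else
    -- for i, v in enumerate(A): if v not in first: first[v] = i
    let first := (PySem.List.enumerate A).foldl
      (fun d p => if d.contains p.2 then d else d.insert p.2 p.1)
      (PySem.Dict.empty : PySem.Dict Int Int)
    let vals := PySem.Dict.values first
    if (vals.length : Int) < X then -1
    else PySem.List.pyGetD vals (X - 1) (-1)   -- 1 ≤ X ≤ len(vals): always in range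

-- ===== PRECONDITION & SPEC =====
-- Pre_ excludes exactly the inputs (X < 1 or empty A) on which Python A's guard fails and it
-- returns None, which is not an int; B returns None there too.
def Pre_solution (X : Int) (A : List Int) : Prop := 1 ≤ X ∧ A ≠ []
instance (X : Int) (A : List Int) : Decidable (Pre_solution X A) := by unfold Pre_solution; infer_instance
def pvWitness_solution : Int × List Int := (2, [1, 3, 1, 3, 2])

def Spec_solution (X : Int) (A : List Int) (out : Int) : Prop := out = solution_alt X A
instance (X : Int) (A : List Int) (out : Int) : Decidable (Spec_solution X A out) := by unfold Spec_solution; infer_instance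

-- ===== CLAIM (what is proved, stated in full; the proofs are below) =====
def Claim_equal_solution : Prop := ∀ (X : Int) (A : List Int), Dom_solution X A → Pre_solution X A → Spec_solution X A (solution X A)

-- ===== LEMMAS AND PROOFS =====

-- the first-occurrence fold only ever appends items
theorem firstFold_items_append (l : List (Int × Int)) (d : PySem.Dict Int Int) :
    ∃ t, (l.foldl (fun d p => if d.contains p.2 then d else d.insert p.2 p.1) d).items
          = d.items ++ t := by
  induction l generalizing d with
  | nil => exact ⟨[], by simp⟩
  | cons p rest ih =>
    simp only [List.foldl_cons]
    by_cases h : d.contains p.2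
    · simpa [h] using ih d
    · obtain ⟨t, ht⟩ := ih (d.insert p.2 p.1)
      refine ⟨[(p.2, p.1)] ++ t, ?_⟩
      simp only [Bool.not_eq_true] at h
      simp [h, ht, PySem.Dict.items_insert_of_not_contains d p.1 h]

-- core invariant: A's set-scan over indices = B's select on the finished first-occurrence dict
theorem loop_eq_select (X : Int) (A : List Int) (r : List Int)
    (s : PySem.Set Int) (d : PySem.Dict Int Int)
    (hm : ∀ v : Int, PySem.Set.contains s v = d.contains v)
    (hl : s.length = d.size) (hx : (s.length : Int) < X) :
    solutionLoopA X A r s =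
      (if ((PySem.Dict.values ((r.map (fun j => (j, PySem.List.pyGetD A j 0))).foldl
              (fun d p => if d.contains p.2 then d else d.insert p.2 p.1) d)).length : Int) < X
       then -1
       else PySem.List.pyGetD
         (PySem.Dict.values ((r.map (fun j => (j, PySem.List.pyGetD A j 0))).foldl
              (fun d p => if d.contains p.2 then d else d.insert p.2 p.1) d)) (X - 1) (-1)) := by
  induction r generalizing s d with
  | nil =>
    simp only [solutionLoopA, List.map_nil, List.foldl_nil]
    have h2 : ((PySem.Dict.values d).length : Int) < X := by
      have h3 : (PySem.Dict.values d).length = s.length := by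
        simp only [PySem.Dict.values, List.length_map]
        exact (hl.symm : d.size = s.length)
      rw [h3]; exact hx
    simp [h2]
  | cons j rest ih =>
    simp only [solutionLoopA, List.map_cons, List.foldl_cons]
    set v := PySem.List.pyGetD A j 0 with hv
    by_cases hc : PySem.Set.contains s v
    · -- v already seen: set unchanged, dict unchanged
      have hd : d.contains v = true := by rw [← hm]; exact hc
      have hs' : PySem.Set.add s v = s := by
        unfold PySem.Set.add; rw [if_pos hc]
      rw [hs', hd]
      have hne : ¬ PySem.Set.len s = X := by
        simp only [PySem.Set.len]; omega
      simp only [hne, if_false]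
      exact ih s d hm hl hx
    · -- new value: set and dict each grow by one
      have hd : d.contains v = false := by rw [← hm]; simpa using hc
      have hs' : PySem.Set.add s v = s ++ [v] := by
        unfold PySem.Set.add; rw [if_neg hc]
      have hitems := PySem.Dict.items_insert_of_not_contains d j hd
      rw [hs', hd]
      simp only [Bool.false_eq_true, if_false]
      by_cases hX : ((s.length : Int) + 1) = X
      · -- the set just reached size X: A returns j; B's X-th value is j
        have hlen : PySem.Set.len (s ++ [v]) = X := by
          simp [PySem.Set.len]; omega
        rw [if_pos hlen]
        obtain ⟨t, ht⟩ := firstFold_items_append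
          (rest.map (fun j => (j, PySem.List.pyGetD A j 0))) (d.insert v j)
        have hvals : PySem.Dict.values
            ((rest.map (fun j => (j, PySem.List.pyGetD A j 0))).foldl
              (fun d p => if d.contains p.2 then d else d.insert p.2 p.1) (d.insert v j))
            = PySem.Dict.values d ++ [j] ++ t.map (·.2) := by
          simp only [PySem.Dict.values, ht, hitems]
          simp
        -- length and index facts
        have hdl : (PySem.Dict.values d).length = d.items.length := by
          simp [PySem.Dict.values]
        have hnotlt : ¬ (((PySem.Dict.values d ++ [j] ++ t.map (·.2)).length : Int) < X) := by
          simp only [List.length_append, List.length_map, List.length_cons, List.length_nil]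
          have hsz : (d.size : Int) = (s.length : Int) := by exact_mod_cast hl.symm
          simp only [PySem.Dict.size] at hsz
          push_cast at hsz ⊢; omega
        have hidx : X - 1 = ((PySem.Dict.values d).length : Int) := by
          rw [hdl]
          have hsz : (d.size : Int) = (s.length : Int) := by exact_mod_cast hl.symm
          simp only [PySem.Dict.size] at hsz
          omega
        rw [hvals, if_neg hnotlt, hidx]
        rw [show ((PySem.Dict.values d).length : Int) = ((PySem.Dict.values d).length : Nat) from rfl,
            PySem.List.pyGetD_natCast]
        simp
      · -- not yet X distinct: both continue with grown states
        have hlen : ¬ PySem.Set.len (s ++ [v]) = X := by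
          simp [PySem.Set.len]; omega
        rw [if_neg hlen]
        refine ih (s ++ [v]) (d.insert v j) ?_ ?_ ?_
        · intro w
          rw [PySem.Dict.contains_insert, ← hm w]
          by_cases hwv : w = v <;>
            simp [PySem.Set.contains, hwv]
        · simp [PySem.Dict.size, hitems, hl]
        · simp only [List.length_append, List.length_cons, List.length_nil]
          push_cast; omega

theorem values_length_pos_case (a : Int) :
    solution_alt 1 [a] = 0 := by
  simp [solution_alt, PySem.List.enumerate, PySem.Dict.values,
    PySem.Dict.empty, PySem.Dict.contains, PySem.Dict.insert, PySem.List.pyGetD,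
    PySem.List.pyGet?, PySem.List.pyIdx?]

-- ===== VERDICT (by name: the statement is the Claim_ definition above) =====
theorem solution_spec : Claim_equal_solution := by
  intro X A _ hpre
  obtain ⟨hX, hA⟩ := hpre
  unfold Spec_solution
  have hlen : 0 < A.length := List.length_pos_iff.mpr hA
  by_cases hspec : X = (A.length : Int) ∧ (A.length : Int) = 1
  · -- A's special branch: X = len(A) = 1, both return 0
    have hA1 : A.length = 1 := by exact_mod_cast hspec.2
    obtain ⟨a, rfl⟩ := List.length_eq_one_iff.mp hA1
    have hX1 : X = 1 := by
      have := hspec.1; simp_all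
    subst hX1
    simp only [solution]
    rw [values_length_pos_case]
    simp
  · have hguard : X - 0 ≥ 1 ∧ (A.length : Int) > 0 := ⟨by omega, by exact_mod_cast hlen⟩
    have hmain := loop_eq_select X A (PySem.List.pyRange 0 (A.length : Int) 1)
      PySem.Set.empty PySem.Dict.empty
      (by intro v; simp [PySem.Set.empty, PySem.Set.contains, PySem.Dict.contains_empty])
      (by simp [PySem.Set.empty, PySem.Dict.size_empty])
      (by simp [PySem.Set.empty]; omega)
    have hng : ¬ (X < 1 ∨ A = []) := by
      rintro (h | h)
      · omega
      · exact hA h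
    simp only [solution, if_pos hguard, if_neg hspec]
    rw [hmain]
    simp only [solution_alt, if_neg hng]
    rw [PySem.List.enumerate_eq_map_pyRange A 0]
    simp [PySem.List.len, List.foldl_map]
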